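-- pv_equiv track=rewrite | github.com/park-kook/data_structure_algorithms | [I]_samsung_fingerprinting.py | is_similar_sp
-- ===== SOURCE A (Python) =====
-- def is_similar_sp(a, b):
--     xor = a ^ b
--     count = 0
--     while (xor):
--         xor = xor & (xor - 1)
--         count += 1
--
--     if count <= 4:
--       return True
--
--     return False
-- ===== SOURCE B (Python) =====
-- _NIBBLE_BITS = (0, 1, 1, 2, 1, 2, 2, 3, 1, 2, 2, 3, 2, 3, 3, 4)
--
--
-- def is_similar_sp(a, b):
--     x = a ^ b
--     c = 0
--     while x > 0:
--         c += _NIBBLE_BITS[x & 15]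
--         x >>= 4
--     return c <= 4
-- ===== Notes on version B (the rewrite author's own statement) =====
-- stated objective: alternative
-- what changed: B counts the set bits of a^b four at a time with a precomputed 16-entry nibble lookup table (add table[x & 15], shift right by 4) instead of A's per-set-bit Kernighan loop xor &= xor-1, and returns the comparison c <= 4 directly instead of an if/return-True/return-False chain.
import Mathlib
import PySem

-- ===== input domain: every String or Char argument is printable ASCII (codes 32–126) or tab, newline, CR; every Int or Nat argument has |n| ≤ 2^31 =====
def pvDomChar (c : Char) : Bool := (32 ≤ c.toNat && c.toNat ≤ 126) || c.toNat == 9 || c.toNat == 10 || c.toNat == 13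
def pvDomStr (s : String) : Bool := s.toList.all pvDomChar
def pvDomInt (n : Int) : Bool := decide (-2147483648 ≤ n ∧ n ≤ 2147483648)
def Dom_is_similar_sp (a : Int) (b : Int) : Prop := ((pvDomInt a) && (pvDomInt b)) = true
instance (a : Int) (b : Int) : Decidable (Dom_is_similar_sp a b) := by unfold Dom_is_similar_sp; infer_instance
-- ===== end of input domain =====

-- B counts set bits of a^b four at a time via a 16-entry nibble lookup table (table[x&15], x>>=4)
-- instead of A's per-set-bit Kernighan loop xor &= xor-1; same result (objective: alternative).


-- ===== PORT A =====
-- termination fact for A's loop (Kernighan step strictly shrinks a positive xor)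
theorem pvKernToNatLt (x : Int) (h : 0 < x) :
    (PySem.Int.band x (x - 1)).toNat < x.toNat := by
  obtain ⟨n, rfl⟩ : ∃ n : ℕ, x = (n : Int) := ⟨x.toNat, (Int.toNat_of_nonneg h.le).symm⟩
  have hn : 0 < n := by exact_mod_cast h
  have h1 : ((n : Int) - 1) = ((n - 1 : ℕ) : Int) := by
    rw [Nat.cast_sub hn]; simp
  rw [h1, PySem.Int.band_natCast]
  have := Nat.and_le_right (n := n) (m := n - 1)
  simp only [Int.toNat_natCast]
  omega

-- `while xor: xor = xor & (xor - 1); count += 1` — the guard `0 < x` is a totality guard: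
-- on negative xor the Python loop never terminates (those inputs are outside Pre_).
def pvLoopA (x : Int) (c : Int) : Int :=
  if h : 0 < x then pvLoopA (PySem.Int.band x (x - 1)) (c + 1) else c
termination_by x.toNat
decreasing_by exact pvKernToNatLt x h

def is_similar_sp (a : Int) (b : Int) : Bool :=
  let xor := PySem.Int.bxor a b
  let count := pvLoopA xor 0
  if count ≤ 4 then true else false

-- ===== PORT B =====
-- the module-level tuple _NIBBLE_BITS: popcounts of the nibbles 0..15
def pvNibbleBits : List Int := [0, 1, 1, 2, 1, 2, 2, 3, 1, 2, 2, 3, 2, 3, 3, 4]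

-- termination fact for B's loop (shifting a positive xor right by 4 shrinks it)
theorem pvShift4ToNatLt (x : Int) (h : 0 < x) :
    (x >>> (4 : Nat)).toNat < x.toNat := by
  obtain ⟨n, rfl⟩ : ∃ n : ℕ, x = (n : Int) := ⟨x.toNat, (Int.toNat_of_nonneg h.le).symm⟩
  have hn : 0 < n := by exact_mod_cast h
  rw [← Int.natCast_shiftRight]
  simp only [Int.toNat_natCast, Nat.shiftRight_eq_div_pow]
  omega

-- `while x > 0: c += _NIBBLE_BITS[x & 15]; x >>= 4` — the index x & 15 is always in
-- range 0..15 here (x > 0), so the tuple lookup never raises; `.getD 0` is exact.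
def pvLoopB (x : Int) (c : Int) : Int :=
  if h : 0 < x then
    pvLoopB (x >>> (4 : Nat)) (c + (PySem.List.pyGet? pvNibbleBits (PySem.Int.band x 15)).getD 0)
  else c
termination_by x.toNat
decreasing_by exact pvShift4ToNatLt x h

def is_similar_sp_alt (a : Int) (b : Int) : Bool :=
  let x := PySem.Int.bxor a b
  let c := pvLoopB x 0
  decide (c ≤ 4)

-- ===== PRECONDITION & SPEC =====
-- Pre_ excludes exactly the inputs with a ^ b < 0 (one argument negative, the other not):
-- there Python A loops forever (xor & (xor-1) never reaches 0), so A returns no value.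
def Pre_is_similar_sp (a : Int) (b : Int) : Prop := 0 ≤ PySem.Int.bxor a b
instance (a : Int) (b : Int) : Decidable (Pre_is_similar_sp a b) := by unfold Pre_is_similar_sp; infer_instance

def pvWitness_is_similar_sp : Int × Int := (3, 5)

def Spec_is_similar_sp (a : Int) (b : Int) (out : Bool) : Prop := out = is_similar_sp_alt a b
instance (a : Int) (b : Int) (out : Bool) : Decidable (Spec_is_similar_sp a b out) := by unfold Spec_is_similar_sp; infer_instance

-- ===== CLAIM (what is proved, stated in full; the proofs are below) =====
def Claim_equal_is_similar_sp : Prop := ∀ (a : Int) (b : Int), Dom_is_similar_sp a b → Pre_is_similar_sp a b → Spec_is_similar_sp a b (is_similar_sp a b)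

-- ===== LEMMAS AND PROOFS =====

-- halving recursion for bitCount, valid at 0 too
theorem pvBitRec (n : ℕ) :
    PySem.Int.bitCount ((n : ℕ) : Int) = n % 2 + PySem.Int.bitCount ((n / 2 : ℕ) : Int) := by
  rcases Nat.eq_zero_or_pos n with h | h
  · subst h; decide
  · exact PySem.Int.bitCount_natCast h

-- bit count splits across a base-2^k digit
theorem pvBitSplit (k : ℕ) : ∀ q r : ℕ, r < 2 ^ k →
    PySem.Int.bitCount ((2 ^ k * q + r : ℕ) : Int) =
      PySem.Int.bitCount ((r : ℕ) : Int) + PySem.Int.bitCount ((q : ℕ) : Int) := by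
  induction k with
  | zero =>
    intro q r hr
    interval_cases r
    simp
  | succ k ih =>
    intro q r hr
    have hpow : 2 ^ (k + 1) = 2 * 2 ^ k := by ring
    have h2 : (2 ^ (k + 1) * q + r) % 2 = r % 2 := by
      rw [hpow, mul_assoc]; exact Nat.mul_add_mod 2 (2 ^ k * q) r
    have h3 : (2 ^ (k + 1) * q + r) / 2 = 2 ^ k * q + r / 2 := by
      rw [hpow, mul_assoc]; exact Nat.mul_add_div (by norm_num) _ _
    have h4 : r / 2 < 2 ^ k := by rw [hpow] at hr; omega
    have := pvBitRec (2 ^ (k + 1) * q + r)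
    rw [h2, h3, ih q (r / 2) h4] at this
    have := pvBitRec r
    omega

-- bit count splits at the low nibble
theorem pvBitCount16 (n : ℕ) :
    PySem.Int.bitCount ((n : ℕ) : Int) =
      PySem.Int.bitCount ((n % 16 : ℕ) : Int) + PySem.Int.bitCount ((n / 16 : ℕ) : Int) := by
  have h := pvBitSplit 4 (n / 16) (n % 16) (by omega)
  have he : 2 ^ 4 * (n / 16) + n % 16 = n := by omega
  rw [he] at h
  exact h

-- masking with 15 is reduction mod 16
theorem pvAnd15 (n : ℕ) : n &&& 15 = n % 16 := by
  apply Nat.eq_of_testBit_eq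
  intro i
  rw [Nat.testBit_and, show (15 : ℕ) = 2 ^ 4 - 1 from rfl, Nat.testBit_two_pow_sub_one,
    show (16 : ℕ) = 2 ^ 4 from rfl, Nat.testBit_mod_two_pow]
  exact Bool.and_comm _ _

-- the table is correct: entry r is the bit count of r, for r < 16
theorem pvTableOk (r : ℕ) (h : r < 16) :
    (PySem.List.pyGet? pvNibbleBits ((r : ℕ) : Int)).getD 0 =
      ((PySem.Int.bitCount ((r : ℕ) : Int) : ℕ) : Int) := by
  interval_cases r <;> decide

-- B's loop computes c + bitCount on nonnegative xor
theorem pvLoopB_eq (n : ℕ) : ∀ c : Int,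
    pvLoopB (n : Int) c = c + (PySem.Int.bitCount ((n : ℕ) : Int) : Int) := by
  induction n using Nat.strong_induction_on with
  | _ n ih =>
    intro c
    rw [pvLoopB]
    rcases Nat.eq_zero_or_pos n with h | h
    · subst h; simp
    · have hg : (0 : Int) < (n : Int) := by exact_mod_cast h
      rw [dif_pos hg,
        show ((15 : Int) = ((15 : ℕ) : Int)) from rfl, PySem.Int.band_natCast,
        pvAnd15, pvTableOk (n % 16) (by omega),
        ← Int.natCast_shiftRight,
        show n >>> 4 = n / 16 from by rw [Nat.shiftRight_eq_div_pow]]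
      rw [ih (n / 16) (by omega)]
      have := pvBitCount16 n
      omega

-- A's loop: one Kernighan step removes exactly one set bit ------------------

-- doubling a number does not change its bit count
theorem pvBitCountDouble (t : ℕ) :
    PySem.Int.bitCount ((2 * t : ℕ) : Int) = PySem.Int.bitCount ((t : ℕ) : Int) := by
  rcases Nat.eq_zero_or_pos t with h | h
  · subst h; rfl
  · rw [PySem.Int.bitCount_natCast (by omega : 0 < 2 * t)]
    have h2 : (2 * t) % 2 = 0 := by omega
    have h3 : (2 * t) / 2 = t := by omega
    rw [h2, h3]
    omega

-- Kernighan step on an odd number clears the last bit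
theorem pvAndPredOdd (n : ℕ) (h : n % 2 = 1) : n &&& (n - 1) = n - 1 := by
  apply Nat.eq_of_testBit_eq
  intro k
  cases k with
  | zero =>
    have h0 : (n - 1) % 2 = 0 := by omega
    rw [Nat.testBit_and]
    simp [Nat.testBit_zero, h0]
  | succ k =>
    have hd : n / 2 = (n - 1) / 2 := by omega
    rw [Nat.testBit_and]
    simp [Nat.testBit_add_one, hd]

-- Kernighan step on a positive even number is the step on its half, doubled
theorem pvAndPredEven (n : ℕ) (h0 : 0 < n) (h : n % 2 = 0) :
    n &&& (n - 1) = 2 * ((n / 2) &&& (n / 2 - 1)) := by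
  apply Nat.eq_of_testBit_eq
  intro k
  cases k with
  | zero =>
    have h1 : (2 * ((n / 2) &&& (n / 2 - 1))) % 2 = 0 := by omega
    rw [Nat.testBit_and]
    simp [Nat.testBit_zero, h, h1]
  | succ k =>
    have hd : (n - 1) / 2 = n / 2 - 1 := by omega
    have hq : (2 * ((n / 2) &&& (n / 2 - 1))) / 2 = (n / 2) &&& (n / 2 - 1) := by omega
    rw [Nat.testBit_and]
    simp [Nat.testBit_add_one, hd, hq]

-- one Kernighan step removes exactly one set bit
theorem pvKernCount (n : ℕ) (h : 0 < n) :
    PySem.Int.bitCount ((n &&& (n - 1) : ℕ) : Int) + 1 = PySem.Int.bitCount ((n : ℕ) : Int) := by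
  induction n using Nat.strong_induction_on with
  | _ n ih =>
    rcases Nat.even_or_odd n with he | ho
    · have h2 : n % 2 = 0 := Nat.even_iff.mp he
      have hm : 0 < n / 2 := by omega
      rw [pvAndPredEven n h h2, pvBitCountDouble,
        ih (n / 2) (by omega) hm,
        PySem.Int.bitCount_natCast h, h2]
      omega
    · have h2 : n % 2 = 1 := Nat.odd_iff.mp ho
      have hn1 : n - 1 = 2 * (n / 2) := by omega
      rw [pvAndPredOdd n h2, hn1, pvBitCountDouble,
        PySem.Int.bitCount_natCast h, h2]
      omega

-- A's loop computes c + bitCount on nonnegative xor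
theorem pvLoopA_eq (n : ℕ) : ∀ c : Int,
    pvLoopA (n : Int) c = c + (PySem.Int.bitCount ((n : ℕ) : Int) : Int) := by
  induction n using Nat.strong_induction_on with
  | _ n ih =>
    intro c
    rw [pvLoopA]
    rcases Nat.eq_zero_or_pos n with h | h
    · subst h; simp
    · have hg : (0 : Int) < (n : Int) := by exact_mod_cast h
      have h1 : ((n : Int) - 1) = ((n - 1 : ℕ) : Int) := by rw [Nat.cast_sub h]; simp
      rw [dif_pos hg, h1, PySem.Int.band_natCast]
      have hlt : n &&& (n - 1) < n := by
        have := Nat.and_le_right (n := n) (m := n - 1); omega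
      rw [ih (n &&& (n - 1)) hlt (c + 1)]
      have := pvKernCount n h
      omega

-- ===== VERDICT (by name: the statement is the Claim_ definition above) =====
theorem is_similar_sp_spec : Claim_equal_is_similar_sp := by
  intro a b _ hpre
  unfold Spec_is_similar_sp is_similar_sp is_similar_sp_alt
  obtain ⟨n, hn⟩ : ∃ n : ℕ, PySem.Int.bxor a b = (n : Int) :=
    ⟨(PySem.Int.bxor a b).toNat, (Int.toNat_of_nonneg hpre).symm⟩
  simp only [hn, pvLoopA_eq, pvLoopB_eq]
  split <;> simp_all
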